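-- pv_equiv track=rewrite | github.com/roger326/Insights.ai | insights_ai_hub_v7/market_news.py | _weight_sources
-- ===== SOURCE A (Python) =====
-- def _weight_sources(items, borough_hint=None):
--     if not borough_hint: return items
--     b=borough_hint.lower()
--     out=[]
--     for it in items:
--         t=(it.get('title') or '').lower()
--         if 'brooklyn' in b and any(k in t for k in ['brooklyn','williamsburg','greenpoint','dumbo']): out.insert(0,it)
--         elif 'manhattan' in b and any(k in t for k in ['manhattan','chelsea','soho','tribeca','ues','uws']): out.insert(0,it)
--         elif 'queens' in b and any(k in t for k in ['queens','astoria','lic','long island city']): out.insert(0,it)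
--         else: out.append(it)
--     return out
-- ===== SOURCE B (Python) =====
-- _KEYWORDS = [
--     ('brooklyn', ('brooklyn', 'williamsburg', 'greenpoint', 'dumbo')),
--     ('manhattan', ('manhattan', 'chelsea', 'soho', 'tribeca', 'ues', 'uws')),
--     ('queens', ('queens', 'astoria', 'lic', 'long island city')),
-- ]
--
-- def _weight_sources(items, borough_hint=None):
--     if not borough_hint:
--         return items
--     b = borough_hint.lower()
--     kws = [k for name, group in _KEYWORDS if name in b for k in group]
--
--     def hit(it):
--         t = (it.get('title') or '').lower()
--         return any(k in t for k in kws)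
--
--     # matched titles end up front-most-last in A, i.e. in reverse document
--     # order: filter the reversed list, then append the non-hits in order.
--     return [it for it in reversed(items) if hit(it)] + \
--            [it for it in items if not hit(it)]
-- ===== Notes on version B (the rewrite author's own statement) =====
-- stated objective: faster
-- what changed: Replaces A's destination-building loop (insert(0)/append on one growing list, three separate keyword branches) by a declarative two-filter formulation: flatten the applicable keywords once, then return the hits filtered out of reversed(items) followed by the non-hits filtered out of items; no mutation, no accumulator, O(n) instead of A's quadratic insert(0) loop.
import Mathlib
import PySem

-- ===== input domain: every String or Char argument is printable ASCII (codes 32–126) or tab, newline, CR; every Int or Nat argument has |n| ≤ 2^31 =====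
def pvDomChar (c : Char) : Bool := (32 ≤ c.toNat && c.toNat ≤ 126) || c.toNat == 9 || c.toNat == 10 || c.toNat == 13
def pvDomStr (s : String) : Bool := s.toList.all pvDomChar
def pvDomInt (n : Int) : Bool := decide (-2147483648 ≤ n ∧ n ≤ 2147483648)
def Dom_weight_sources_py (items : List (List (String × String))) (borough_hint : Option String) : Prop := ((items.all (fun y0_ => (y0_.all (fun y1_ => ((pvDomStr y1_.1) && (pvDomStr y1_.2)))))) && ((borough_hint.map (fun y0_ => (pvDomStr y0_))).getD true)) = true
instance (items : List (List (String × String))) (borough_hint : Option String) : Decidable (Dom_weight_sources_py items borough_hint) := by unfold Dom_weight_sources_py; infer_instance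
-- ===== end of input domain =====

-- B drops A's insert-at-front loop for a declarative two-filter form (hits filtered from the
-- reversed list, then the non-hits in order), with the applicable keywords flattened once: O(n) vs A's O(n^2).
-- ===== PORT A =====
def weight_sources_py (items : List (List (String × String))) (borough_hint : Option String) : List (List (String × String)) :=
  match borough_hint with
  | none => items
  | some h =>
    if h = "" then items else
    let b := PySem.Str.lower h
    items.foldl (fun out it =>
      let t := PySem.Str.lower (PySem.Dict.getD (PySem.Dict.mk it) "title" "")
      if PySem.Str.isIn "brooklyn" b &&
          ["brooklyn", "williamsburg", "greenpoint", "dumbo"].any (fun k => PySem.Str.isIn k t) then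
        it :: out
      else if PySem.Str.isIn "manhattan" b &&
          ["manhattan", "chelsea", "soho", "tribeca", "ues", "uws"].any (fun k => PySem.Str.isIn k t) then
        it :: out
      else if PySem.Str.isIn "queens" b &&
          ["queens", "astoria", "lic", "long island city"].any (fun k => PySem.Str.isIn k t) then
        it :: out
      else
        out ++ [it]) []

-- ===== PORT B =====
-- B-side helper: the module-level _KEYWORDS table of Source B
def pvKeywords : List (String × List String) :=
  [("brooklyn", ["brooklyn", "williamsburg", "greenpoint", "dumbo"]),
   ("manhattan", ["manhattan", "chelsea", "soho", "tribeca", "ues", "uws"]),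
   ("queens", ["queens", "astoria", "lic", "long island city"])]

def weight_sources_py_alt (items : List (List (String × String))) (borough_hint : Option String) : List (List (String × String)) :=
  match borough_hint with
  | none => items
  | some h =>
    if h = "" then items else
    let b := PySem.Str.lower h
    let kws := (pvKeywords.filter (fun p => PySem.Str.isIn p.1 b)).flatMap (fun p => p.2)
    let hit := fun (it : List (String × String)) =>
      kws.any (fun k => PySem.Str.isIn k (PySem.Str.lower (PySem.Dict.getD (PySem.Dict.mk it) "title" "")))
    items.reverse.filter hit ++ items.filter (fun it => !hit it)

-- ===== PRECONDITION & SPEC =====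
def Spec_weight_sources_py (items : List (List (String × String))) (borough_hint : Option String) (out : List (List (String × String))) : Prop := out = weight_sources_py_alt items borough_hint
instance (items : List (List (String × String))) (borough_hint : Option String) (out : List (List (String × String))) : Decidable (Spec_weight_sources_py items borough_hint out) := by unfold Spec_weight_sources_py; infer_instance

-- ===== CLAIM (what is proved, stated in full; the proofs are below) =====
def Claim_equal_weight_sources_py : Prop := ∀ (items : List (List (String × String))) (borough_hint : Option String), Dom_weight_sources_py items borough_hint → Spec_weight_sources_py items borough_hint (weight_sources_py items borough_hint)

-- ===== LEMMAS AND PROOFS =====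

-- A's insert-front/append loop computes reversed hits followed by the non-hits.
theorem pv_loop_eq (p : List (String × String) → Bool) (l : List (List (String × String)))
    (X Y : List (List (String × String))) :
    l.foldl (fun out it => if p it then it :: out else out ++ [it]) (X ++ Y)
      = ((l.filter p).reverse ++ X) ++ (Y ++ l.filter (fun it => !p it)) := by
  induction l generalizing X Y with
  | nil => simp
  | cons x xs ih =>
    by_cases hx : p x = true
    · have h := ih (x :: X) Y
      simp only [List.cons_append] at h
      simp [hx, List.foldl_cons, h, List.append_assoc]
    · have h := ih X (Y ++ [x])
      simp only [List.append_assoc] at h ⊢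
      simp [hx, List.foldl_cons, h]

-- A's three same-result branches collapse to B's single flattened-keyword test.
theorem pv_pred_eq (b t : String) :
    (((pvKeywords.filter (fun p => PySem.Str.isIn p.1 b)).flatMap (fun p => p.2)).any
        (fun k => PySem.Str.isIn k t))
      = ((PySem.Str.isIn "brooklyn" b &&
            ["brooklyn", "williamsburg", "greenpoint", "dumbo"].any (fun k => PySem.Str.isIn k t))
         || (PySem.Str.isIn "manhattan" b &&
            ["manhattan", "chelsea", "soho", "tribeca", "ues", "uws"].any (fun k => PySem.Str.isIn k t))
         || (PySem.Str.isIn "queens" b &&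
            ["queens", "astoria", "lic", "long island city"].any (fun k => PySem.Str.isIn k t))) := by
  cases h1 : PySem.Str.isIn "brooklyn" b <;>
  cases h2 : PySem.Str.isIn "manhattan" b <;>
  cases h3 : PySem.Str.isIn "queens" b <;>
  simp only [pvKeywords, List.filter_cons, List.filter_nil, h1, h2, h3] <;>
  simp [Bool.or_assoc]

-- ===== VERDICT (by name: the statement is the Claim_ definition above) =====
theorem weight_sources_py_spec : Claim_equal_weight_sources_py := by
  intro items borough_hint _
  unfold Spec_weight_sources_py weight_sources_py weight_sources_py_alt
  cases borough_hint with
  | none => rfl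
  | some h =>
    by_cases hh : h = ""
    · simp [hh]
    · simp only [hh, if_false]
      set b := PySem.Str.lower h with hb
      set p : List (String × String) → Bool := fun it =>
        ((pvKeywords.filter (fun q => PySem.Str.isIn q.1 b)).flatMap (fun q => q.2)).any
          (fun k => PySem.Str.isIn k (PySem.Str.lower (PySem.Dict.getD (PySem.Dict.mk it) "title" ""))) with hp
      have hfun : (fun (out : List (List (String × String))) it =>
          let t := PySem.Str.lower (PySem.Dict.getD (PySem.Dict.mk it) "title" "")
          if PySem.Str.isIn "brooklyn" b &&
              ["brooklyn", "williamsburg", "greenpoint", "dumbo"].any (fun k => PySem.Str.isIn k t) then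
            it :: out
          else if PySem.Str.isIn "manhattan" b &&
              ["manhattan", "chelsea", "soho", "tribeca", "ues", "uws"].any (fun k => PySem.Str.isIn k t) then
            it :: out
          else if PySem.Str.isIn "queens" b &&
              ["queens", "astoria", "lic", "long island city"].any (fun k => PySem.Str.isIn k t) then
            it :: out
          else
            out ++ [it])
          = (fun out it => if p it then it :: out else out ++ [it]) := by
        funext out it
        simp only [hp, pv_pred_eq]
        cases hA : PySem.Str.isIn "brooklyn" b &&
            ["brooklyn", "williamsburg", "greenpoint", "dumbo"].any
              (fun k => PySem.Str.isIn k (PySem.Str.lower (PySem.Dict.getD (PySem.Dict.mk it) "title" ""))) <;>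
        cases hB : PySem.Str.isIn "manhattan" b &&
            ["manhattan", "chelsea", "soho", "tribeca", "ues", "uws"].any
              (fun k => PySem.Str.isIn k (PySem.Str.lower (PySem.Dict.getD (PySem.Dict.mk it) "title" ""))) <;>
        cases hC : PySem.Str.isIn "queens" b &&
            ["queens", "astoria", "lic", "long island city"].any
              (fun k => PySem.Str.isIn k (PySem.Str.lower (PySem.Dict.getD (PySem.Dict.mk it) "title" ""))) <;>
        simp
      rw [hfun]
      have h := pv_loop_eq p items [] []
      simp only [List.append_nil, List.nil_append] at h
      rw [h, List.filter_reverse]
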